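-- pv_equiv track=rewrite | github.com/tsuru7/algorithm-study | AtCoder/ABC/201-300/ABC289/D-2.py | solve
-- ===== SOURCE A (Python) =====
-- YES = 'Yes'
--
-- NO  = 'No'
--
-- def solve(n,m,a,b,x):
--     setb = set(b)
--     dp = [False]*(x+1)
--     dp[0] = True
--     for i in range(x):
--         for aj in a:
--             if i+aj <= x:
--                 if i+aj not in setb:
--                     dp[i+aj] |= dp[i]
--     if dp[x]:
--         return YES
--     else:
--         return NO
-- ===== SOURCE B (Python) =====
-- YES = 'Yes'
--
-- NO = 'No'
--
-- def solve(n, m, a, b, x):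
--     # Depth-first search with an explicit stack over the squares actually
--     # reachable from 0, instead of sweeping a DP table over every square.
--     trap = set(b)
--     visited = {0}
--     stack = [0]
--     while stack:
--         u = stack.pop()
--         if u == x:
--             return YES
--         for aj in a:
--             v = u + aj
--             if 0 <= v <= x and v not in trap and v not in visited:
--                 visited.add(v)
--                 stack.append(v)
--     return NO
-- ===== Notes on version B (the rewrite author's own statement) =====
-- stated objective: faster
-- what changed: Replaces A's exhaustive DP table sweep (for every square 0..x-1, write dp[i+aj] for each step) by a graph search: an explicit-stack depth-first search with a visited set that visits only the squares actually reachable from 0 and stops as soon as x is popped; Pre_ restricts to nonnegative x and (for x > 0) nonnegative step sizes, outside which A raises IndexError or its value comes from Python negative-index wraparound.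
-- outside the precondition, e.g. on solve(1, 1, [-1], [1], 1): A returns 'Yes', B returns 'No'
import Mathlib
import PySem

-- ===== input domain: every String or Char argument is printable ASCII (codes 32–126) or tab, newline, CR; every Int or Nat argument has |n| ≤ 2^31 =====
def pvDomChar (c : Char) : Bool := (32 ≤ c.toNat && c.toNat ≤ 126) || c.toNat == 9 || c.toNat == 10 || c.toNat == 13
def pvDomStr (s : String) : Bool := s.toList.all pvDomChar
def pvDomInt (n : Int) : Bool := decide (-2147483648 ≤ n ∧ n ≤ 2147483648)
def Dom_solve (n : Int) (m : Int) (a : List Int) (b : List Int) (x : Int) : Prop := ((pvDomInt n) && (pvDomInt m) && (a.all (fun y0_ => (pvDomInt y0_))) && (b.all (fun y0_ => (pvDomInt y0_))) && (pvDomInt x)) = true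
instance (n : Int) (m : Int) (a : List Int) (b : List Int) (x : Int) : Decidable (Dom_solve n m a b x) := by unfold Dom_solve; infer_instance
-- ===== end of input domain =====

-- B replaces A's exhaustive DP table sweep over all squares by an explicit-stack
-- depth-first search with a visited set that explores only reachable squares.

-- ===== PORT A =====
def solve (n : Int) (m : Int) (a : List Int) (b : List Int) (x : Int) : String :=
  let setb := PySem.Set.ofList b
  let dp : List Bool := List.replicate (x + 1).toNat false
  let dp := PySem.List.pySetD dp 0 true
  let dp := (PySem.List.pyRange 0 x 1).foldl (fun dp i =>
    a.foldl (fun dp aj =>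
      if i + aj ≤ x then
        if !(PySem.Set.contains setb (i + aj)) then
          PySem.List.pySetD dp (i + aj)
            (PySem.List.pyGetD dp (i + aj) false || PySem.List.pyGetD dp i false)
        else dp
      else dp) dp) dp
  if PySem.List.pyGetD dp x false then "Yes" else "No"

-- ===== PORT B =====
-- B's stack is modelled with its TOP AT THE HEAD: Python's stack.append/stack.pop()
-- (push/pop at the END) become cons/head here, so the pop order is identical.
-- The inner `for aj in a` loop of B, mutating (visited, stack):
def dfsStep (a : List Int) (trap : PySem.Set Int) (x : Int) (u : Int)
    (p : PySem.Set Int × List Int) : PySem.Set Int × List Int :=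
  a.foldl (fun p aj =>
    let v := u + aj
    if decide (0 ≤ v) && decide (v ≤ x) && !(PySem.Set.contains trap v)
        && !(PySem.Set.contains p.1 v) then
      (PySem.Set.add p.1 v, v :: p.2)
    else p) p

-- B's `while stack` loop; the fuel (x.toNat + 1 pops suffice, proved below) only
-- makes the recursion total — the fuel-0 branch is never reached under Pre_.
def dfsLoop (a : List Int) (trap : PySem.Set Int) (x : Int) :
    Nat → PySem.Set Int → List Int → String
  | 0, _, _ => "No"
  | _ + 1, _, [] => "No"
  | fuel + 1, visited, u :: rest =>
    if u == x then "Yes"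
    else
      let p := dfsStep a trap x u (visited, rest)
      dfsLoop a trap x fuel p.1 p.2

def solve_alt (n : Int) (m : Int) (a : List Int) (b : List Int) (x : Int) : String :=
  let trap := PySem.Set.ofList b
  dfsLoop a trap x (x.toNat + 1) (PySem.Set.ofList [0]) [0]

-- ===== PRECONDITION & SPEC =====
-- Pre_ excludes negative x, on which A raises IndexError, and (for x > 0) negative step
-- sizes aj, on which A's returned value (when it returns at all) comes from Python's
-- negative-index wraparound, an accident of the push implementation.
def Pre_solve (n : Int) (m : Int) (a : List Int) (b : List Int) (x : Int) : Prop :=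
  0 ≤ x ∧ (x = 0 ∨ ∀ aj ∈ a, 0 ≤ aj)
instance (n : Int) (m : Int) (a : List Int) (b : List Int) (x : Int) : Decidable (Pre_solve n m a b x) := by unfold Pre_solve; infer_instance

def pvWitness_solve : Int × Int × List Int × List Int × Int := (3, 1, [2, 1], [2], 3)

def Spec_solve (n : Int) (m : Int) (a : List Int) (b : List Int) (x : Int) (out : String) : Prop := out = solve_alt n m a b x
instance (n : Int) (m : Int) (a : List Int) (b : List Int) (x : Int) (out : String) : Decidable (Spec_solve n m a b x out) := by unfold Spec_solve; infer_instance

-- ===== CLAIM (what is proved, stated in full; the proofs are below) =====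
def Claim_equal_solve : Prop := ∀ (n : Int) (m : Int) (a : List Int) (b : List Int) (x : Int), Dom_solve n m a b x → Pre_solve n m a b x → Spec_solve n m a b x (solve n m a b x)

-- ===== LEMMAS AND PROOFS =====

-- trap test, as both ports perform it
def inb (b : List Int) (t : Int) : Bool := PySem.Set.contains (PySem.Set.ofList b) t

-- reachability reference: R a b t = "square t is reachable from 0 avoiding traps (0 never trapped)"
def R (a b : List Int) : Nat → Bool
  | 0 => true
  | (t + 1) =>
      !inb b ((t : Int) + 1) &&
      a.any (fun aj =>
        if h : 1 ≤ aj ∧ aj ≤ (t : Int) + 1 then R a b (((t : Int) + 1 - aj).toNat) else false)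
  decreasing_by
    have : ((t : Int) + 1 - aj).toNat < t + 1 := by omega
    simpa using this

lemma R_succ (a b : List Int) (t : Nat) :
    R a b (t + 1) =
      (!inb b ((t : Int) + 1) &&
        a.any (fun aj =>
          decide (1 ≤ aj ∧ aj ≤ (t : Int) + 1) && R a b (((t : Int) + 1 - aj).toNat))) := by
  rw [R]
  have h : ∀ aj : Int,
      (if h : 1 ≤ aj ∧ aj ≤ (t : Int) + 1 then R a b (((t : Int) + 1 - aj).toNat) else false) =
        (decide (1 ≤ aj ∧ aj ≤ (t : Int) + 1) && R a b (((t : Int) + 1 - aj).toNat)) := by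
    intro aj
    by_cases h : 1 ≤ aj ∧ aj ≤ (t : Int) + 1 <;> simp [h]
  rw [List.any_congr rfl h]

-- A's partial value after fully processing sources 0..i-1 (threshold i : Int)
def V (a b : List Int) (i : Int) (j : Nat) : Bool :=
  if j = 0 then true
  else
    !inb b (j : Int) &&
      a.any (fun aj =>
        decide (1 ≤ aj ∧ aj ≤ (j : Int) ∧ (j : Int) - aj < i) && R a b (((j : Int) - aj).toNat))

lemma length_pySetD {α : Type} (xs : List α) (i : Int) (v : α) :
    (PySem.List.pySetD xs i v).length = xs.length := by
  simp [PySem.List.pySetD, PySem.List.pySet?]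
  cases PySem.List.pyIdx? xs.length i <;> simp

lemma pySetD_eq_set (dp : List Bool) (t : Int) (v : Bool) (h0 : 0 ≤ t) (hlt : t < dp.length) :
    PySem.List.pySetD dp t v = dp.set t.toNat v := by
  simp [PySem.List.pySetD, PySem.List.pySet?, PySem.List.pyIdx?, h0]
  rw [if_pos (by omega)]
  simp

lemma getD_set (dp : List Bool) (k j : Nat) (v : Bool) (hk : k < dp.length) :
    (dp.set k v).getD j false = if j = k then v else dp.getD j false := by
  simp only [List.getD_eq_getElem?_getD, List.getElem?_set]
  by_cases h : j = k
  · subst h; simp [hk]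
  · simp [h, Ne.symm h]

lemma getD_pySetD (dp : List Bool) (t : Int) (v : Bool) (j : Nat)
    (h0 : 0 ≤ t) (hlt : t < dp.length) :
    (PySem.List.pySetD dp t v).getD j false = if (j : Int) = t then v else dp.getD j false := by
  rw [pySetD_eq_set dp t v h0 hlt, getD_set dp t.toNat j v (by omega)]
  congr 1
  simp only [eq_iff_iff]
  omega

lemma pyGetD_nonneg (dp : List Bool) (t : Int) (h0 : 0 ≤ t) :
    PySem.List.pyGetD dp t false = dp.getD t.toNat false := by
  rw [PySem.List.pyGetD, PySem.List.pyGet?_of_nonneg (h := h0)]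
  simp [List.getD_eq_getElem?_getD]

lemma V_of_le (a b : List Int) (i : Int) (j : Nat) (hj : (j : Int) ≤ i) :
    V a b i j = R a b j := by
  cases j with
  | zero => simp [V, R]
  | succ t =>
    rw [V, if_neg (by omega), R_succ]
    have hc : ((t + 1 : Nat) : Int) = (t : Int) + 1 := by push_cast; ring
    rw [hc]
    congr 1
    refine List.any_congr rfl (fun aj => ?_)
    by_cases h : 1 ≤ aj ∧ aj ≤ (t : Int) + 1
    · rw [decide_eq_true (by omega : 1 ≤ aj ∧ aj ≤ (t:Int) + 1 ∧ (t:Int) + 1 - aj < i), decide_eq_true h]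
    · rw [decide_eq_false (by omega), decide_eq_false (by omega)]

lemma V_zero (a b : List Int) (j : Nat) (hj : 1 ≤ j) : V a b 0 j = false := by
  rw [V, if_neg (by omega)]
  have h : ∀ aj : Int,
      (decide (1 ≤ aj ∧ aj ≤ (j : Int) ∧ (j : Int) - aj < 0) && R a b (((j : Int) - aj).toNat)) = false := by
    intro aj
    rw [decide_eq_false (by omega)]
    simp
  rw [List.any_congr rfl h]
  simp

-- boolean any-distribution
lemma any_or {α : Type} (l : List α) (f g : α → Bool) :
    l.any (fun z => f z || g z) = (l.any f || l.any g) := by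
  induction l with
  | nil => simp
  | cons z l ih => simp [ih]; cases f z <;> cases g z <;> cases l.any f <;> simp

lemma any_and_const {α : Type} (l : List α) (f : α → Bool) (c : Bool) :
    l.any (fun z => f z && c) = (l.any f && c) := by
  cases c <;> simp

lemma bool_shuffle (c m e r : Bool) : (!c && (m || (e && r))) = ((!c && m) || ((e && !c) && r)) := by
  cases c <;> cases m <;> cases e <;> cases r <;> rfl

lemma bool_absorb (r c : Bool) : r = (r || (c && r)) := by
  cases r <;> cases c <;> rfl

lemma bool_accum (g v c1 c2 : Bool) : ((g || (c1 && v)) || (c2 && v)) = (g || ((c1 || c2) && v)) := by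
  cases g <;> cases v <;> cases c1 <;> cases c2 <;> rfl

-- one source step advances the threshold
lemma V_succ (a b : List Int) (x : Int) (N : Nat) (hx : (N : Int) = x)
    (ha : ∀ aj ∈ a, 0 ≤ aj) (i : Nat) (j : Nat) (hj : j ≤ N) :
    V a b ((i : Int) + 1) j =
      (V a b (i : Int) j ||
        (a.any (fun aj =>
            decide ((i : Int) + aj = (j : Int)) && decide ((i : Int) + aj ≤ x) &&
              !inb b ((i : Int) + aj)) && R a b i)) := by
  by_cases hij : j ≤ i
  · rw [V_of_le a b ((i : Int) + 1) j (by omega), V_of_le a b (i : Int) j (by omega)]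
    cases hAny : a.any (fun aj =>
        decide ((i : Int) + aj = (j : Int)) && decide ((i : Int) + aj ≤ x) &&
          !inb b ((i : Int) + aj)) with
    | false => simp
    | true =>
      obtain ⟨aj, hmem, hP⟩ := List.any_eq_true.mp hAny
      simp only [Bool.and_eq_true, decide_eq_true_eq] at hP
      have h0 := ha aj hmem
      have hji : j = i := by omega
      subst hji
      exact bool_absorb _ _
  · have hj0 : j ≠ 0 := by omega
    rw [V, V, if_neg hj0, if_neg hj0]
    have e1 : ∀ aj : Int,
        (decide (1 ≤ aj ∧ aj ≤ (j : Int) ∧ (j : Int) - aj < (i : Int) + 1) &&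
            R a b (((j : Int) - aj).toNat)) =
          ((decide (1 ≤ aj ∧ aj ≤ (j : Int) ∧ (j : Int) - aj < (i : Int)) &&
              R a b (((j : Int) - aj).toNat)) ||
            (decide ((i : Int) + aj = (j : Int)) && R a b i)) := by
      intro aj
      by_cases hE : (i : Int) + aj = (j : Int)
      · have ht : ((j : Int) - aj).toNat = i := by omega
        rw [ht, decide_eq_true hE]
        by_cases hM : 1 ≤ aj ∧ aj ≤ (j : Int) ∧ (j : Int) - aj < (i : Int)
        · rw [decide_eq_true (show 1 ≤ aj ∧ aj ≤ (j : Int) ∧ (j : Int) - aj < (i : Int) + 1 by omega),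
            decide_eq_true hM]
          cases R a b i <;> simp
        · rw [decide_eq_true (show 1 ≤ aj ∧ aj ≤ (j : Int) ∧ (j : Int) - aj < (i : Int) + 1 by omega),
            decide_eq_false hM]
          cases R a b i <;> simp
      · by_cases hM : 1 ≤ aj ∧ aj ≤ (j : Int) ∧ (j : Int) - aj < (i : Int)
        · rw [decide_eq_true (show 1 ≤ aj ∧ aj ≤ (j : Int) ∧ (j : Int) - aj < (i : Int) + 1 by omega),
            decide_eq_true hM, decide_eq_false hE]
          cases R a b (((j : Int) - aj).toNat) <;> simp
        · rw [decide_eq_false (show ¬(1 ≤ aj ∧ aj ≤ (j : Int) ∧ (j : Int) - aj < (i : Int) + 1) by omega),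
            decide_eq_false hM, decide_eq_false hE]
          simp
    rw [List.any_congr rfl e1, any_or]
    have e2 : ∀ aj : Int,
        (decide ((i : Int) + aj = (j : Int)) && decide ((i : Int) + aj ≤ x) &&
            !inb b ((i : Int) + aj)) =
          (decide ((i : Int) + aj = (j : Int)) && !inb b ((j : Int))) := by
      intro aj
      by_cases hE : (i : Int) + aj = (j : Int)
      · rw [decide_eq_true hE, hE, decide_eq_true (show (j : Int) ≤ x by omega)]
        simp
      · rw [decide_eq_false hE]
        simp
    rw [List.any_congr rfl e2, any_and_const, any_and_const]
    exact bool_shuffle _ _ _ _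

-- inner loop of A: processing the step list from source i ORs (reach i) into each admissible target
lemma A_inner (b : List Int) (x : Int) (N : Nat) (hx : (N : Int) = x)
    (a' : List Int) (ha : ∀ aj ∈ a', 0 ≤ aj) (i : Nat) (dp : List Bool)
    (hlen : dp.length = N + 1) (hi : i ≤ N) :
    (a'.foldl (fun dp aj =>
        if (i : Int) + aj ≤ x then
          if !(PySem.Set.contains (PySem.Set.ofList b) ((i : Int) + aj)) then
            PySem.List.pySetD dp ((i : Int) + aj)
              (PySem.List.pyGetD dp ((i : Int) + aj) false || PySem.List.pyGetD dp (i : Int) false)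
          else dp
        else dp) dp).length = N + 1 ∧
    ∀ j : Nat, j ≤ N →
      (a'.foldl (fun dp aj =>
        if (i : Int) + aj ≤ x then
          if !(PySem.Set.contains (PySem.Set.ofList b) ((i : Int) + aj)) then
            PySem.List.pySetD dp ((i : Int) + aj)
              (PySem.List.pyGetD dp ((i : Int) + aj) false || PySem.List.pyGetD dp (i : Int) false)
          else dp
        else dp) dp).getD j false =
      (dp.getD j false ||
        (a'.any (fun aj =>
            decide ((i : Int) + aj = (j : Int)) && decide ((i : Int) + aj ≤ x) &&
              !inb b ((i : Int) + aj)) && dp.getD i false)) := by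
  induction a' generalizing dp with
  | nil => exact ⟨hlen, fun j _ => by simp⟩
  | cons aj rest ih =>
    have h0 : 0 ≤ aj := ha aj (List.mem_cons_self)
    have ha' : ∀ z ∈ rest, 0 ≤ z := fun z hz => ha z (List.mem_cons_of_mem _ hz)
    -- characterize one step of the body
    set dp₂ := (if (i : Int) + aj ≤ x then
        if !(PySem.Set.contains (PySem.Set.ofList b) ((i : Int) + aj)) then
          PySem.List.pySetD dp ((i : Int) + aj)
            (PySem.List.pyGetD dp ((i : Int) + aj) false || PySem.List.pyGetD dp (i : Int) false)
        else dp
      else dp) with hdp₂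
    have hlen₂ : dp₂.length = N + 1 := by
      rw [hdp₂]
      split_ifs <;> simp [hlen]
    have hstep : ∀ j : Nat, j ≤ N →
        dp₂.getD j false =
          (dp.getD j false ||
            ((decide ((i : Int) + aj = (j : Int)) && decide ((i : Int) + aj ≤ x) &&
              !inb b ((i : Int) + aj)) && dp.getD i false)) := by
      intro j hj
      rw [hdp₂]
      by_cases hle : (i : Int) + aj ≤ x
      · by_cases hbn : PySem.Set.contains (PySem.Set.ofList b) ((i : Int) + aj) = true
        · rw [if_pos hle, if_neg (by rw [hbn]; decide)]
          have hinb : inb b ((i : Int) + aj) = true := hbn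
          rw [hinb]
          simp
        · rw [if_pos hle, if_pos (by rw [(Bool.not_eq_true _).mp hbn]; decide)]
          rw [getD_pySetD dp _ _ j (by omega) (by rw [hlen]; omega)]
          rw [pyGetD_nonneg dp _ (by omega), pyGetD_nonneg dp _ (by omega)]
          by_cases hEq : (j : Int) = (i : Int) + aj
          · rw [if_pos hEq]
            have h1 : ((i : Int) + aj).toNat = j := by omega
            have h2 : ((i : Int)).toNat = i := by omega
            rw [h1, h2, decide_eq_true hEq.symm, decide_eq_true hle]
            simp only [Bool.not_eq_true] at hbn
            have hinb : inb b ((i : Int) + aj) = false := hbn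
            rw [hinb]
            simp
          · rw [if_neg hEq, decide_eq_false (fun hc => hEq (hc.symm))]
            simp
      · rw [if_neg hle, decide_eq_false hle]
        simp
    have hsame_i : dp₂.getD i false = dp.getD i false := by
      rw [hdp₂]
      by_cases hle : (i : Int) + aj ≤ x
      · by_cases hbn : PySem.Set.contains (PySem.Set.ofList b) ((i : Int) + aj) = true
        · rw [if_pos hle, if_neg (by rw [hbn]; decide)]
        · rw [if_pos hle, if_pos (by rw [(Bool.not_eq_true _).mp hbn]; decide)]
          rw [getD_pySetD dp _ _ i (by omega) (by rw [hlen]; omega)]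
          by_cases hEq : (i : Int) = (i : Int) + aj
          · rw [if_pos hEq]
            rw [pyGetD_nonneg dp _ (by omega), pyGetD_nonneg dp _ (by omega)]
            have h1 : ((i : Int) + aj).toNat = i := by omega
            have h2 : ((i : Int)).toNat = i := by omega
            rw [h1, h2, Bool.or_self]
          · rw [if_neg hEq]
      · rw [if_neg hle]
    obtain ⟨ihlen, ihget⟩ := ih ha' dp₂ hlen₂
    refine ⟨?_, fun j hj => ?_⟩
    · simp only [List.foldl_cons]
      rw [← hdp₂]
      exact ihlen
    · simp only [List.foldl_cons]
      rw [← hdp₂, ihget j hj, hstep j hj, hsame_i, List.any_cons]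
      exact bool_accum _ _ _ _

-- outer loop of A: after processing sources 0..i-1 the board holds V i
lemma A_outer (a b : List Int) (x : Int) (N : Nat) (hx : (N : Int) = x)
    (ha : ∀ aj ∈ a, 0 ≤ aj) (dp1 : List Bool) (h1len : dp1.length = N + 1)
    (h1 : ∀ j : Nat, j ≤ N → dp1.getD j false = V a b 0 j) (i : Nat) (hi : i ≤ N) :
    ((List.range i).foldl (fun dp (k : Nat) =>
        a.foldl (fun dp aj =>
          if (k : Int) + aj ≤ x then
            if !(PySem.Set.contains (PySem.Set.ofList b) ((k : Int) + aj)) then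
              PySem.List.pySetD dp ((k : Int) + aj)
                (PySem.List.pyGetD dp ((k : Int) + aj) false || PySem.List.pyGetD dp (k : Int) false)
            else dp
          else dp) dp) dp1).length = N + 1 ∧
    ∀ j : Nat, j ≤ N →
      ((List.range i).foldl (fun dp (k : Nat) =>
        a.foldl (fun dp aj =>
          if (k : Int) + aj ≤ x then
            if !(PySem.Set.contains (PySem.Set.ofList b) ((k : Int) + aj)) then
              PySem.List.pySetD dp ((k : Int) + aj)
                (PySem.List.pyGetD dp ((k : Int) + aj) false || PySem.List.pyGetD dp (k : Int) false)
            else dp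
          else dp) dp) dp1).getD j false = V a b (i : Int) j := by
  induction i with
  | zero =>
    refine ⟨by simpa using h1len, fun j hj => ?_⟩
    simpa using h1 j hj
  | succ i ih =>
    obtain ⟨hlenm, hgetm⟩ := ih (by omega)
    obtain ⟨hlen', hget'⟩ := A_inner b x N hx a ha i _ hlenm (by omega)
    refine ⟨?_, fun j hj => ?_⟩
    · rw [List.range_succ, List.foldl_append, List.foldl_cons, List.foldl_nil]
      exact hlen'
    · rw [List.range_succ, List.foldl_append, List.foldl_cons, List.foldl_nil]
      rw [hget' j hj, hgetm j hj, hgetm i (by omega),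
        V_of_le a b (i : Int) i (le_refl _),
        show ((i + 1 : Nat) : Int) = (i : Int) + 1 by push_cast; ring]
      exact (V_succ a b x N hx ha i j hj).symm

-- ========== B (DFS) side ==========

-- R survives one forward step
lemma R_of_pred (a b : List Int) (u aj : Int) (h0 : 0 ≤ u) (hR : R a b u.toNat = true)
    (hmem : aj ∈ a) (h1 : 1 ≤ aj) (hnb : inb b (u + aj) = false) :
    R a b (u + aj).toNat = true := by
  have ht : (u + aj).toNat = ((u + aj).toNat - 1) + 1 := by omega
  rw [ht, R_succ]
  have hcast : (((u + aj).toNat - 1 : Nat) : Int) + 1 = u + aj := by omega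
  rw [hcast, hnb]
  simp only [Bool.not_false, Bool.true_and]
  refine List.any_eq_true.mpr ⟨aj, hmem, ?_⟩
  rw [decide_eq_true (show 1 ≤ aj ∧ aj ≤ u + aj by omega), Bool.true_and]
  have he : u + aj - aj = u := by ring
  rw [he, hR]

-- "every admissible successor of u through a step of l is already visited"
def ClosedL (l b : List Int) (x : Int) (Vs : List Int) (u : Int) : Prop :=
  ∀ aj ∈ l, 0 ≤ u + aj → u + aj ≤ x → inb b (u + aj) = false → u + aj ∈ Vs

lemma ClosedL_mono (l b : List Int) (x : Int) (Vs Vs' : List Int) (u : Int)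
    (hsub : ∀ w ∈ Vs, w ∈ Vs') (h : ClosedL l b x Vs u) : ClosedL l b x Vs' u :=
  fun aj hm h0 hx hnb => hsub _ (h aj hm h0 hx hnb)

-- common part of the DFS invariant
def InvC (a b : List Int) (x : Int) (Vs S : List Int) : Prop :=
  0 ∈ Vs ∧ Vs.Nodup ∧ S.Nodup ∧ (∀ w ∈ S, w ∈ Vs) ∧
  (∀ v ∈ Vs, 0 ≤ v ∧ v ≤ x ∧ R a b v.toNat = true)

-- full invariant: every popped (visited, off-stack) node is ≠ x and closed
def DInv (a b : List Int) (x : Int) (Vs S : List Int) : Prop :=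
  InvC a b x Vs S ∧ ∀ v ∈ Vs, v ∉ S → v ≠ x ∧ ClosedL a b x Vs v

-- invariant with the currently popped node u exempted
def InvX (a b : List Int) (x u : Int) (Vs S : List Int) : Prop :=
  InvC a b x Vs S ∧ ∀ v ∈ Vs, v ∉ S → v ≠ u → v ≠ x ∧ ClosedL a b x Vs v

-- the literal body of B's inner for-loop (same term as in dfsStep with trap = set(b))
def dfsBody (b : List Int) (x u : Int) (p : PySem.Set Int × List Int) (aj : Int) :
    PySem.Set Int × List Int :=
  let v := u + aj
  if decide (0 ≤ v) && decide (v ≤ x) && !(PySem.Set.contains (PySem.Set.ofList b) v)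
      && !(PySem.Set.contains p.1 v) then
    (PySem.Set.add p.1 v, v :: p.2)
  else p

lemma dfsStep_eq_foldl (a b : List Int) (x u : Int) (p : PySem.Set Int × List Int) :
    dfsStep a (PySem.Set.ofList b) x u p = a.foldl (dfsBody b x u) p := rfl

-- the inner for-loop: invariant preserved, u becomes closed w.r.t. the steps processed
lemma dfsFold_spec (a b : List Int) (x : Int) (ha : ∀ aj ∈ a, 0 ≤ aj) (u : Int)
    (l : List Int) (hl : ∀ aj ∈ l, aj ∈ a) :
    ∀ (Vs S : List Int), InvX a b x u Vs S → u ∈ Vs → u ∉ S →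
      InvX a b x u (l.foldl (dfsBody b x u) (Vs, S)).1 (l.foldl (dfsBody b x u) (Vs, S)).2 ∧
      (∀ w ∈ Vs, w ∈ (l.foldl (dfsBody b x u) (Vs, S)).1) ∧
      u ∉ (l.foldl (dfsBody b x u) (Vs, S)).2 ∧
      (l.foldl (dfsBody b x u) (Vs, S)).2.length + Vs.length =
        S.length + (l.foldl (dfsBody b x u) (Vs, S)).1.length ∧
      ClosedL l b x (l.foldl (dfsBody b x u) (Vs, S)).1 u := by
  induction l with
  | nil =>
    intro Vs S hInv hu huS
    exact ⟨hInv, fun w hw => hw, huS, by simp, fun aj hm => absurd hm (List.not_mem_nil)⟩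
  | cons aj l ih =>
    intro Vs S hInv hu huS
    have hl' : ∀ z ∈ l, z ∈ a := fun z hz => hl z (List.mem_cons_of_mem _ hz)
    have hmemaj : aj ∈ a := hl aj List.mem_cons_self
    rw [List.foldl_cons]
    by_cases hc : (decide (0 ≤ u + aj) && decide (u + aj ≤ x)
        && !(PySem.Set.contains (PySem.Set.ofList b) (u + aj))
        && !(PySem.Set.contains Vs (u + aj))) = true
    · -- push
      have hstep : dfsBody b x u (Vs, S) aj = (PySem.Set.add Vs (u + aj), (u + aj) :: S) := by
        unfold dfsBody
        rw [if_pos hc]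
      rw [hstep]
      simp only [Bool.and_eq_true, Bool.not_eq_true', decide_eq_true_eq] at hc
      obtain ⟨⟨⟨h0, hxle⟩, hnb⟩, hnv⟩ := hc
      have hvnot : u + aj ∉ Vs := fun hmem => by
        rw [(PySem.Set.contains_iff Vs (u + aj)).mpr hmem] at hnv
        exact Bool.noConfusion hnv
      obtain ⟨⟨hc0, hcnd, hcsnd, hcsub, hcR⟩, hcl⟩ := hInv
      have hune : u + aj ≠ u := fun he => hvnot (by rw [he]; exact hu)
      have haj1 : 1 ≤ aj := by
        have := ha aj hmemaj
        rcases lt_or_ge 0 aj with h | h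
        · omega
        · exfalso; apply hune; omega
      obtain ⟨hu0, hule, hRu⟩ := hcR u hu
      have hRv : R a b (u + aj).toNat = true :=
        R_of_pred a b u aj hu0 hRu hmemaj haj1 (by simpa [inb] using hnb)
      have hadd : PySem.Set.add Vs (u + aj) = Vs ++ [u + aj] :=
        PySem.Set.add_of_not_mem hvnot
      have hmemAdd : ∀ w : Int, w ∈ PySem.Set.add Vs (u + aj) ↔ w ∈ Vs ∨ w = u + aj :=
        fun w => PySem.Set.mem_add Vs (u + aj) w
      have hInv' : InvX a b x u (PySem.Set.add Vs (u + aj)) ((u + aj) :: S) := by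
        refine ⟨⟨(hmemAdd 0).mpr (Or.inl hc0), PySem.Set.nodup_add _ _ hcnd, ?_, ?_, ?_⟩, ?_⟩
        · exact List.nodup_cons.mpr ⟨fun hmem => hvnot (hcsub _ hmem), hcsnd⟩
        · intro w hw
          rcases List.mem_cons.mp hw with he | hw'
          · exact (hmemAdd w).mpr (Or.inr he)
          · exact (hmemAdd w).mpr (Or.inl (hcsub w hw'))
        · intro v hv
          rcases (hmemAdd v).mp hv with hv' | he
          · exact hcR v hv'
          · subst he; exact ⟨h0, hxle, hRv⟩
        · intro v hv hvS hvu
          rcases (hmemAdd v).mp hv with hv' | he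
          · have hvS' : v ∉ S := fun hm => hvS (List.mem_cons_of_mem _ hm)
            obtain ⟨hne, hcl'⟩ := hcl v hv' hvS' hvu
            exact ⟨hne, ClosedL_mono _ _ _ _ _ _ (fun w hw => (hmemAdd w).mpr (Or.inl hw)) hcl'⟩
          · exact absurd (he ▸ List.mem_cons_self) hvS
      have hu' : u ∈ PySem.Set.add Vs (u + aj) := (hmemAdd u).mpr (Or.inl hu)
      have huS' : u ∉ (u + aj) :: S := by
        intro hm
        rcases List.mem_cons.mp hm with he | hm'
        · exact hune he.symm
        · exact huS hm'
      obtain ⟨rInv, rMono, ruS, rLen, rCl⟩ := ih hl' _ _ hInv' hu' huS'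
      refine ⟨rInv, ?_, ruS, ?_, ?_⟩
      · intro w hw; exact rMono w ((hmemAdd w).mpr (Or.inl hw))
      · have hlen1 : (PySem.Set.add Vs (u + aj)).length = Vs.length + 1 := by
          rw [hadd]; simp
        have hlen2 : ((u + aj) :: S).length = S.length + 1 := by simp
        omega
      · intro aj' hm h0' hx' hnb'
        rcases List.mem_cons.mp hm with he | hm'
        · subst he; exact rMono _ ((hmemAdd (u + aj')).mpr (Or.inr rfl))
        · exact rCl aj' hm' h0' hx' hnb'
    · -- skip
      have hstep : dfsBody b x u (Vs, S) aj = (Vs, S) := by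
        unfold dfsBody
        rw [if_neg hc]
      rw [hstep]
      obtain ⟨rInv, rMono, ruS, rLen, rCl⟩ := ih hl' _ _ hInv hu huS
      refine ⟨rInv, rMono, ruS, rLen, ?_⟩
      intro aj' hm h0' hx' hnb'
      rcases List.mem_cons.mp hm with he | hm'
      · subst he
        have hcv : PySem.Set.contains Vs (u + aj') = true := by
          cases hcont : PySem.Set.contains Vs (u + aj') with
          | true => rfl
          | false =>
            exfalso; apply hc
            have hnb'' : PySem.Set.contains (PySem.Set.ofList b) (u + aj') = false := hnb'
            rw [decide_eq_true h0', decide_eq_true hx', hnb'', hcont]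
            rfl
        exact rMono _ ((PySem.Set.contains_iff Vs (u + aj')).mp hcv)
      · exact rCl aj' hm' h0' hx' hnb'

-- visited nodes are distinct integers in [0, x]
lemma visited_length_le (x : Int) (hx : 0 ≤ x) (Vs : List Int) (hnd : Vs.Nodup)
    (hb : ∀ v ∈ Vs, 0 ≤ v ∧ v ≤ x) : Vs.length ≤ x.toNat + 1 := by
  have hsub : Vs.toFinset ⊆ Finset.Icc 0 x := by
    intro v hv
    rw [List.mem_toFinset] at hv
    rw [Finset.mem_Icc]
    exact ⟨(hb v hv).1, (hb v hv).2⟩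
  calc Vs.length = Vs.toFinset.card := (List.toFinset_card_of_nodup hnd).symm
    _ ≤ (Finset.Icc 0 x).card := Finset.card_le_card hsub
    _ = (x + 1 - 0).toNat := Int.card_Icc 0 x
    _ = x.toNat + 1 := by omega

-- completeness: a closed visited set containing 0 contains every reachable square
lemma reach_mem (a b : List Int) (x : Int) (Vs : List Int) (h0 : 0 ∈ Vs)
    (hcl : ∀ v ∈ Vs, ClosedL a b x Vs v) :
    ∀ t : Nat, (t : Int) ≤ x → R a b t = true → (t : Int) ∈ Vs := by
  intro t
  induction t using Nat.strong_induction_on with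
  | _ t ih =>
    intro htx hR
    cases t with
    | zero => simpa using h0
    | succ t =>
      rw [R_succ] at hR
      simp only [Bool.and_eq_true, Bool.not_eq_true'] at hR
      obtain ⟨hnb, hany⟩ := hR
      obtain ⟨aj, hmem, hP⟩ := List.any_eq_true.mp hany
      simp only [Bool.and_eq_true, decide_eq_true_eq] at hP
      obtain ⟨⟨h1, h2⟩, hRp⟩ := hP
      set p : Nat := ((t : Int) + 1 - aj).toNat with hp
      have hpcast : (p : Int) = (t : Int) + 1 - aj := by omega
      have hplt : p < t + 1 := by omega
      have hpx : (p : Int) ≤ x := by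
        have : ((t + 1 : Nat) : Int) = (t : Int) + 1 := by push_cast; ring
        omega
      have hpmem : (p : Int) ∈ Vs := ih p hplt hpx hRp
      have := hcl _ hpmem aj hmem (by omega) (by
          have : ((t + 1 : Nat) : Int) = (t : Int) + 1 := by push_cast; ring
          omega) (by
          have he : (p : Int) + aj = (t : Int) + 1 := by omega
          rw [he]; exact hnb)
      have he : (p : Int) + aj = ((t + 1 : Nat) : Int) := by push_cast; omega
      rwa [he] at this

-- the main loop computes reachability of x
lemma dfs_main (a b : List Int) (x : Int) (hx : 0 ≤ x) (ha : ∀ aj ∈ a, 0 ≤ aj) :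
    ∀ (fuel : Nat) (Vs S : List Int), DInv a b x Vs S →
      S.length + (x.toNat + 1) ≤ fuel + Vs.length →
      dfsLoop a (PySem.Set.ofList b) x fuel Vs S =
        (if R a b x.toNat then "Yes" else "No") := by
  intro fuel
  induction fuel with
  | zero =>
    intro Vs S hInv hfuel
    exfalso
    obtain ⟨⟨h0, hnd, _, _, hR⟩, hcl⟩ := hInv
    have hle : Vs.length ≤ x.toNat + 1 :=
      visited_length_le x hx Vs hnd (fun v hv => ⟨(hR v hv).1, (hR v hv).2.1⟩)
    have hS0 : S.length = 0 := by omega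
    have hVfull : Vs.length = x.toNat + 1 := by omega
    have hSnil : S = [] := List.length_eq_zero_iff.mp hS0
    subst hSnil
    -- Vs is all of [0, x], so x ∈ Vs, contradicting closedness (x would equal x)
    have hsub : Vs.toFinset ⊆ Finset.Icc 0 x := by
      intro v hv
      rw [List.mem_toFinset] at hv
      rw [Finset.mem_Icc]
      exact ⟨(hR v hv).1, (hR v hv).2.1⟩
    have hcard : (Finset.Icc 0 x).card ≤ Vs.toFinset.card := by
      rw [List.toFinset_card_of_nodup hnd, hVfull, Int.card_Icc]
      omega
    have heq : Vs.toFinset = Finset.Icc 0 x := Finset.eq_of_subset_of_card_le hsub hcard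
    have hxmem : x ∈ Vs := by
      rw [← List.mem_toFinset, heq, Finset.mem_Icc]
      omega
    exact (hcl x hxmem (List.not_mem_nil)).1 rfl
  | succ fuel ih =>
    intro Vs S hInv hfuel
    cases S with
    | nil =>
      rw [dfsLoop]
      obtain ⟨⟨h0, _, _, _, hR⟩, hcl⟩ := hInv
      by_cases hRx : R a b x.toNat = true
      · exfalso
        have hxmem : (x.toNat : Int) ∈ Vs :=
          reach_mem a b x Vs h0 (fun v hv => (hcl v hv (List.not_mem_nil)).2)
            x.toNat (by omega) hRx
        have hxc : (x.toNat : Int) = x := by omega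
        rw [hxc] at hxmem
        exact (hcl x hxmem (List.not_mem_nil)).1 rfl
      · rw [if_neg (by simpa using hRx)]
    | cons u rest =>
      rw [dfsLoop]
      obtain ⟨⟨h0, hnd, hsnd, hsub, hR⟩, hcl⟩ := hInv
      by_cases hux : u = x
      · rw [if_pos (by simpa using hux)]
        have hRu := (hR u (hsub u List.mem_cons_self)).2.2
        have hc : u.toNat = x.toNat := by rw [hux]
        rw [hc] at hRu
        rw [if_pos hRu]
      · rw [if_neg (by simpa using hux)]
        simp only []
        have hu : u ∈ Vs := hsub u List.mem_cons_self
        have huRest : u ∉ rest := (List.nodup_cons.mp hsnd).1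
        have hInvX : InvX a b x u Vs rest := by
          refine ⟨⟨h0, hnd, (List.nodup_cons.mp hsnd).2,
            fun w hw => hsub w (List.mem_cons_of_mem _ hw), hR⟩, ?_⟩
          intro v hv hvR hvu
          exact hcl v hv (fun hm => by
            rcases List.mem_cons.mp hm with he | hm'
            · exact hvu he
            · exact hvR hm')
        rw [dfsStep_eq_foldl]
        obtain ⟨rInv, rMono, ruS, rLen, rCl⟩ :=
          dfsFold_spec a b x ha u a (fun _ h => h) Vs rest hInvX hu huRest
        have hInv' : DInv a b x
            (a.foldl (dfsBody b x u) (Vs, rest)).1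
            (a.foldl (dfsBody b x u) (Vs, rest)).2 := by
          obtain ⟨⟨r0, rnd, rsnd, rsub, rR⟩, rcl⟩ := rInv
          refine ⟨⟨r0, rnd, rsnd, rsub, rR⟩, ?_⟩
          intro v hv hvS
          by_cases hvu : v = u
          · subst hvu
            exact ⟨hux, rCl⟩
          · exact rcl v hv hvS hvu
        refine ih _ _ hInv' ?_
        have : (a.foldl (dfsBody b x u) (Vs, rest)).2.length + Vs.length =
            rest.length + (a.foldl (dfsBody b x u) (Vs, rest)).1.length := rLen
        simp only [List.length_cons] at hfuel
        omega

-- ===== VERDICT =====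
theorem solve_spec : Claim_equal_solve := by
  intro n m a b x _ hpre
  obtain ⟨hx0, hrest⟩ := hpre
  by_cases hxz : x = 0
  · subst hxz
    rfl
  have ha : ∀ aj ∈ a, 0 ≤ aj := by tauto
  unfold Spec_solve
  have hB : solve_alt n m a b x = (if R a b x.toNat then "Yes" else "No") := by
    simp only [solve_alt]
    have hof : PySem.Set.ofList [(0 : Int)] = [0] := rfl
    rw [hof]
    refine dfs_main a b x hx0 ha (x.toNat + 1) [0] [0] ?_ ?_
    · refine ⟨⟨List.mem_singleton.mpr rfl, List.nodup_singleton 0, List.nodup_singleton 0,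
        fun w hw => hw, ?_⟩, ?_⟩
      · intro v hv
        rw [List.mem_singleton] at hv
        subst hv
        exact ⟨le_refl 0, hx0, by simp [R]⟩
      · intro v hv hvS
        exact absurd hv hvS
    · omega
  rw [hB]
  -- A side
  simp only [solve]
  set N := x.toNat with hN
  have hx : (N : Int) = x := Int.toNat_of_nonneg hx0
  have hxe : (x + 1).toNat = N + 1 := by omega
  rw [hxe]
  set dp1 := PySem.List.pySetD (List.replicate (N + 1) false) 0 true with hdp1
  have h1len : dp1.length = N + 1 := by rw [hdp1, length_pySetD]; simp
  have h1A : ∀ j : Nat, j ≤ N → dp1.getD j false = V a b 0 j := by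
    intro j hj
    rw [hdp1, getD_pySetD _ 0 true j (by omega) (by simp)]
    have hrep : (List.replicate (N + 1) false).getD j false = false := by
      simp [List.getD_eq_getElem?_getD, List.getElem?_replicate]
      split_ifs <;> rfl
    rw [hrep]
    by_cases hj0 : j = 0
    · subst hj0; simp [V]
    · rw [if_neg (by exact_mod_cast hj0), V_zero a b j (by omega)]
  rw [PySem.List.pyRange_one 0 x, show (x - 0).toNat = N by omega, List.foldl_map]
  simp only [zero_add]
  obtain ⟨hAlen, hAget⟩ := A_outer a b x N hx ha dp1 h1len h1A N (le_refl _)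
  rw [pyGetD_nonneg _ x hx0, ← hN, hAget N (le_refl _), V_of_le a b (N : Int) N (le_refl _)]
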